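-- pv_equiv track=rewrite | github.com/brandonsladek/python-bin-packing | bin_packing_wc.py | get_max_height
-- ===== SOURCE A (Python) =====
-- def get_max_height(some_boxes_dict):
--     heights = []
--     for key, value in some_boxes_dict.items():
--         heights.append(value[1])
--
--     if (len(heights) == 0):
--         return 0
--     else:
--         return max(heights)
-- ===== SOURCE B (Python) =====
-- def get_max_height(some_boxes_dict):
--     if not some_boxes_dict:
--         return 0
--     return sorted(value[1] for value in some_boxes_dict.values())[-1]
-- ===== Notes on version B (the rewrite author's own statement) =====
-- stated objective: alternative
-- what changed: Replaces the build-a-heights-list-then-max scan with a sort-based selection: sort the heights ascending and return the last element (the maximum), with an early 0 for an empty dict; trades an O(n) scan for an O(n log n) sort.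
import Mathlib
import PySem

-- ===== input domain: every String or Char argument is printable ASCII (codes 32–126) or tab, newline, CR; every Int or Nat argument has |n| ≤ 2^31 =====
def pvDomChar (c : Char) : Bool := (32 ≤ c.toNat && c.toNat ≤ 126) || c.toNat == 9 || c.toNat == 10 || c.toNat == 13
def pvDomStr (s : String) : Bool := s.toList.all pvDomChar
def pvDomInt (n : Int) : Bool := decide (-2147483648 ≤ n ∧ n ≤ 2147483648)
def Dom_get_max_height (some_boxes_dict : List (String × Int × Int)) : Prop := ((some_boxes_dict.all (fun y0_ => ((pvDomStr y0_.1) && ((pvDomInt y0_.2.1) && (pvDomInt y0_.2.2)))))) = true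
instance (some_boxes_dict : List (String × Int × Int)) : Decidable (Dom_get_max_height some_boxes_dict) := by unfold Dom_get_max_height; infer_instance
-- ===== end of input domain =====

-- B replaces the heights-list-then-max scan with a sort-based selection: sort the heights and take the last element.
-- ===== PORT A =====
-- heights = []; for key, value in d.items(): heights.append(value[1]); then 0 if empty else max(heights)
def get_max_height (some_boxes_dict : List (String × Int × Int)) : Int :=
  let d := PySem.Dict.ofList some_boxes_dict
  let heights := d.items.foldl (fun hs kv => hs ++ [kv.2.2]) []
  if heights.length == 0 then 0
  else (PySem.List.max? heights (fun y => y)).getD 0  -- max(heights); nonempty here, so getD never fires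

-- ===== PORT B =====
-- if not d: return 0; return sorted(value[1] for value in d.values())[-1]
def get_max_height_alt (some_boxes_dict : List (String × Int × Int)) : Int :=
  let d := PySem.Dict.ofList some_boxes_dict
  if d.items.length == 0 then 0
  else
    let s := PySem.List.sorted (d.values.map (fun v => v.2)) (fun y => y) false
    (PySem.List.pyGet? s (-1)).getD 0  -- s[-1]; s is nonempty here, so getD never fires

-- ===== PRECONDITION & SPEC =====
def Spec_get_max_height (some_boxes_dict : List (String × Int × Int)) (out : Int) : Prop := out = get_max_height_alt some_boxes_dict
instance (some_boxes_dict : List (String × Int × Int)) (out : Int) : Decidable (Spec_get_max_height some_boxes_dict out) := by unfold Spec_get_max_height; infer_instance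

-- ===== CLAIM (what is proved, stated in full; the proofs are below) =====
def Claim_equal_get_max_height : Prop := ∀ (some_boxes_dict : List (String × Int × Int)), Dom_get_max_height some_boxes_dict → Spec_get_max_height some_boxes_dict (get_max_height some_boxes_dict)

-- ===== LEMMAS AND PROOFS =====

-- appending one element at a time builds the map
theorem hfold_append (ps : List (String × Int × Int)) (acc : List Int) :
    ps.foldl (fun hs kv => hs ++ [kv.2.2]) acc = acc ++ ps.map (fun kv => kv.2.2) := by
  induction ps generalizing acc with
  | nil => simp
  | cons p t ih => simp [List.foldl, ih]

-- the last element of an ascending sort of a nonempty Int list is its maximum (Python's max)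
theorem getLast?_sorted_eq_max? (xs : List Int) (hne : xs ≠ []) :
    (PySem.List.sorted xs (fun y => y) false).getLast? = PySem.List.max? xs (fun y => y) := by
  set s := PySem.List.sorted xs (fun y => y) false with hs
  have hsne : s ≠ [] := by
    intro h
    exact hne ((PySem.List.sorted_eq_nil_iff _ _ _).mp h)
  have hlen : 0 < s.length := List.length_pos_iff.mpr hsne
  obtain ⟨m, hm⟩ : ∃ m, PySem.List.max? xs (fun y => y) = some m := by
    cases h : PySem.List.max? xs (fun y => y) with
    | none => exact absurd ((PySem.List.max?_eq_none_iff _ _).mp h) hne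
    | some m => exact ⟨m, rfl⟩
  rw [hm]
  have hg : s.getLast? = some (s.getLast hsne) := List.getLast?_eq_some_getLast hsne
  rw [hg]
  congr 1
  have hgmem : s.getLast hsne ∈ xs := by
    have : s.getLast hsne ∈ s := List.getLast_mem hsne
    exact (PySem.List.mem_sorted _ _ _ _).mp this
  have hmmem : m ∈ xs := PySem.List.max?_mem hm
  have hglast : s.getLast hsne = s[s.length - 1] := List.getLast_eq_getElem hsne
  -- maximality of the last element of the sorted list
  have hmax : ∀ y ∈ xs, y ≤ s.getLast hsne := by
    intro y hy
    have hy' : y ∈ s := (PySem.List.mem_sorted _ _ _ _).mpr hy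
    obtain ⟨p, hp, hpe⟩ := List.mem_iff_getElem.mp hy'
    have := PySem.List.sorted_id_getElem_mono (xs := xs) (p := p) (q := s.length - 1)
      (by omega) (by rw [← hs]; omega)
    rw [hglast]
    rw [← hpe] at this ⊢
    exact this
  exact le_antisymm (PySem.List.max?_isMax hm _ hgmem) (hmax m hmmem)

-- ===== VERDICT (by name: the statement is the Claim_ definition above) =====
theorem get_max_height_spec : Claim_equal_get_max_height := by
  intro l _
  unfold Spec_get_max_height get_max_height get_max_height_alt
  simp only [hfold_append, List.nil_append, PySem.Dict.values, List.map_map]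
  cases h : (PySem.Dict.ofList l).items with
  | nil => simp
  | cons p t =>
      have hne : (p :: t).map (fun kv => kv.2.2) ≠ [] := by simp
      simp only [List.length_map, List.length_cons, PySem.List.pyGet?_neg_one,
        getLast?_sorted_eq_max? _ hne, Function.comp_def]
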